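-- pv_equiv track=rewrite | github.com/pypi-data/pypi-mirror-404 | packages/codegeass/codegeass-0.2.8-py3-none-any.whl/codegeass/notifications/formatter.py | _html_to_discord_markdown
-- ===== SOURCE A (Python) =====
-- def _html_to_discord_markdown(html: str) -> str:
--     """Convert HTML-formatted message to Discord Markdown."""
--     # Simple conversions
--     conversions = [
--         ("<b>", "**"),
--         ("</b>", "**"),
--         ("<i>", "_"),
--         ("</i>", "_"),
--         ("<code>", "`"),
--         ("</code>", "`"),
--         ("<pre>", "```\n"),
--         ("</pre>", "\n```"),
--     ]
--
--     result = html
--     for html_tag, md in conversions: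
--         result = result.replace(html_tag, md)
--
--     return result
-- ===== SOURCE B (Python) =====
-- def _html_to_discord_markdown(html: str) -> str:
--     """Convert HTML-formatted message to Discord Markdown."""
--     conversions = {
--         "<b>": "**",
--         "</b>": "**",
--         "<i>": "_",
--         "</i>": "_",
--         "<code>": "`",
--         "</code>": "`",
--         "<pre>": "```\n",
--         "</pre>": "\n```",
--     }
--     out = []
--     i = 0
--     n = len(html)
--     while i < n:
--         for tag, md in conversions.items():
--             if html.startswith(tag, i):
--                 out.append(md)
--                 i += len(tag)
--                 break
--         else:
--             out.append(html[i])
--             i += 1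
--     return "".join(out)
-- ===== Notes on version B (the rewrite author's own statement) =====
-- stated objective: alternative
-- what changed: A makes eight sequential full-string replace passes, one per HTML tag; B makes a single left-to-right pass driven by a tag-to-markdown table, trying the tags at each position and emitting the replacement or copying the character.
import Mathlib
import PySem

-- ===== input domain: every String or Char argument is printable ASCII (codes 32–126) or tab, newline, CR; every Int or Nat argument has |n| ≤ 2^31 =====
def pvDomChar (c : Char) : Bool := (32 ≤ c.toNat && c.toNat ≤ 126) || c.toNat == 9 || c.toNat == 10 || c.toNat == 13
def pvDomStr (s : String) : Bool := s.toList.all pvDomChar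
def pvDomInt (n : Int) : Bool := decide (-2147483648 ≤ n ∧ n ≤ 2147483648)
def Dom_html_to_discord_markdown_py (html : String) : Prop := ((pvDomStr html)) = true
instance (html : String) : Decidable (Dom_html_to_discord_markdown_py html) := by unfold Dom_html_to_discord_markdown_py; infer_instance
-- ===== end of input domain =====

-- B replaces A's eight sequential full-string `replace` passes by a single left-to-right
-- table-driven scan (try each tag at the current position, emit its markdown or copy the char);
-- objective: alternative single-pass algorithm, same exact output.

-- ===== PORT A =====
def html_to_discord_markdown_py (html : String) : String :=
  let conversions : List (String × String) :=
    [("<b>", "**"), ("</b>", "**"), ("<i>", "_"), ("</i>", "_"),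
     ("<code>", "`"), ("</code>", "`"), ("<pre>", "```\n"), ("</pre>", "\n```")]
  conversions.foldl (fun result p => PySem.Str.replace result p.1 p.2) html


-- ===== PORT B =====
-- pvScan is the single left-to-right scan of Source B: at each position try the tags of the
-- conversion table in order; on a match emit the markdown and skip the tag, else copy the char.
def pvScan : List Char → List Char
  | [] => []
  | c :: cs =>
    if List.isPrefixOf ['<','b','>'] (c :: cs) then '*' :: '*' :: pvScan (cs.drop 2)
    else if List.isPrefixOf ['<','/','b','>'] (c :: cs) then '*' :: '*' :: pvScan (cs.drop 3)
    else if List.isPrefixOf ['<','i','>'] (c :: cs) then '_' :: pvScan (cs.drop 2)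
    else if List.isPrefixOf ['<','/','i','>'] (c :: cs) then '_' :: pvScan (cs.drop 3)
    else if List.isPrefixOf ['<','c','o','d','e','>'] (c :: cs) then '`' :: pvScan (cs.drop 5)
    else if List.isPrefixOf ['<','/','c','o','d','e','>'] (c :: cs) then '`' :: pvScan (cs.drop 6)
    else if List.isPrefixOf ['<','p','r','e','>'] (c :: cs) then '`' :: '`' :: '`' :: '\n' :: pvScan (cs.drop 4)
    else if List.isPrefixOf ['<','/','p','r','e','>'] (c :: cs) then '\n' :: '`' :: '`' :: '`' :: pvScan (cs.drop 5)
    else c :: pvScan cs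
termination_by l => l.length
decreasing_by all_goals (simp [List.length_drop]; try omega)

def html_to_discord_markdown_py_alt (html : String) : String :=
  String.ofList (pvScan html.toList)

-- ===== PRECONDITION & SPEC =====
def Spec_html_to_discord_markdown_py (html : String) (out : String) : Prop := out = html_to_discord_markdown_py_alt html
instance (html : String) (out : String) : Decidable (Spec_html_to_discord_markdown_py html out) := by unfold Spec_html_to_discord_markdown_py; infer_instance

-- ===== CLAIM (what is proved, stated in full; the proofs are below) =====
def Claim_equal_html_to_discord_markdown_py : Prop := ∀ (html : String), Dom_html_to_discord_markdown_py html → Spec_html_to_discord_markdown_py html (html_to_discord_markdown_py html)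

-- ===== LEMMAS AND PROOFS =====
-- Strategy: pvRep is a clean structural model of PySem.Chars.replace (go_eq_pvRep /
-- replace_eq_pvRep).  A's fold is pvChain over the tag table pvConvs; we show that a chain of
-- pvRep passes over "good" tag/replacement pairs (tags start with '<', never prefixes of one
-- another, replacements are nonempty, contain no '<' and no tag-tail characters) equals the
-- one-pass scan pvScan, by strong induction following pvScan's case split.
def pvRep (old new : List Char) : List Char → List Char
  | [] => []
  | c :: cs =>
    if List.isPrefixOf old (c :: cs) then new ++ pvRep old new (cs.drop (old.length - 1))
    else c :: pvRep old new cs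
termination_by l => l.length
decreasing_by all_goals (simp [List.length_drop]; try omega)

theorem go_eq_pvRep (old new : List Char) (hold : old ≠ []) :
    ∀ (fuel : Nat) (l acc : List Char), l.length ≤ fuel →
      PySem.Chars.replace.go old new fuel l acc = acc.reverse ++ pvRep old new l := by
  intro fuel
  induction fuel with
  | zero =>
    intro l acc hl
    have : l = [] := by cases l <;> simp_all
    subst this
    simp [PySem.Chars.replace.go, pvRep]
  | succ n ih =>
    intro l acc hl
    cases l with
    | nil => simp [PySem.Chars.replace.go, pvRep]
    | cons c cs =>
      rw [PySem.Chars.replace.go]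
      by_cases hp : List.isPrefixOf old (c :: cs)
      · rw [if_pos hp, pvRep, if_pos hp]
        have hlen : old.length ≥ 1 := by cases old <;> simp_all
        have hdrop : List.drop old.length (c :: cs) = cs.drop (old.length - 1) := by
          cases old with
          | nil => simp_all
          | cons o os => simp
        rw [hdrop] at *
        rw [ih _ _ (by simp [List.length_drop] at *; omega)]
        simp
      · rw [if_neg hp, pvRep, if_neg hp]
        rw [ih _ _ (by simp at hl; omega)]
        simp

theorem replace_eq_pvRep (s old new : List Char) (hold : old ≠ []) :
    PySem.Chars.replace s old new = pvRep old new s := by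
  rw [PySem.Chars.replace]
  rw [if_neg (by simp [List.isEmpty_iff]; exact hold)]
  rw [go_eq_pvRep old new hold s.length s [] (le_refl _)]
  simp

-- pass-through when old is not a prefix
theorem pvRep_cons_neg (old new : List Char) (c : Char) (cs : List Char)
    (h : ¬ old <+: (c :: cs)) : pvRep old new (c :: cs) = c :: pvRep old new cs := by
  rw [pvRep, if_neg (by simpa [List.isPrefixOf_iff_prefix] using h)]

-- consume a match
theorem pvRep_match (old new X : List Char) (hold : old ≠ []) :
    pvRep old new (old ++ X) = new ++ pvRep old new X := by
  cases old with
  | nil => simp_all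
  | cons o os =>
    rw [List.cons_append, pvRep, if_pos (by simp [List.isPrefixOf_iff_prefix])]
    simp

-- skip over a segment containing no '<' (old starts with '<')
theorem pvRep_skip_clean (tl old new : List Char) (p X : List Char)
    (hold : old = '<' :: tl) (hp : ∀ a ∈ p, a ≠ '<') :
    pvRep old new (p ++ X) = p ++ pvRep old new X := by
  induction p with
  | nil => simp
  | cons a p ih =>
    have ha : a ≠ '<' := hp a (by simp)
    rw [List.cons_append, pvRep_cons_neg]
    · rw [ih (fun b hb => hp b (by simp [hb]))]; simp
    · intro hpre
      rw [hold] at hpre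
      rcases List.cons_prefix_cons.mp hpre with ⟨h1, _⟩
      exact ha h1.symm

-- a prefix of the output avoiding new's characters was already a prefix of the input
theorem pvRep_prefix_back (old new : List Char) (hnew : new ≠ []) :
    ∀ (X u : List Char), (∀ a ∈ u, a ∉ new) → u <+: pvRep old new X → u <+: X := by
  intro X
  induction X using pvRep.induct old with
  | case1 =>
    intro u _ h
    simpa [pvRep] using h
  | case2 c cs hp ih =>
    intro u hu h
    rw [pvRep, if_pos hp] at h
    cases u with
    | nil => exact List.nil_prefix
    | cons a u' =>
      cases new with
      | nil => exact absurd rfl hnew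
      | cons b new' =>
        rcases List.cons_prefix_cons.mp h with ⟨h1, _⟩
        exact absurd (by simp [h1]) (hu a (by simp))
  | case3 c cs hp ih =>
    intro u hu h
    rw [pvRep, if_neg hp] at h
    cases u with
    | nil => exact List.nil_prefix
    | cons a u' =>
      rcases List.cons_prefix_cons.mp h with ⟨h1, h2⟩
      exact h1 ▸ List.cons_prefix_cons.mpr ⟨rfl, ih u' (fun b hb => hu b (by simp [hb])) h2⟩

def pvBad : List Char := ['*', '_', '`', '\n']

def pvGood (p : List Char × List Char) : Prop :=
  p.1.head? = some '<' ∧ (∀ a ∈ p.1.tail, a ≠ '<' ∧ a ∉ pvBad) ∧ p.2 ≠ [] ∧ (∀ a ∈ p.2, a ∈ pvBad)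

def pvChain (l : List (List Char × List Char)) (s : List Char) : List Char :=
  l.foldl (fun s p => pvRep p.1 p.2 s) s

theorem lift_noPrefix (old new t tl : List Char) (c : Char) (cs : List Char)
    (hgn : ∀ a ∈ new, a ∈ pvBad) (hnew : new ≠ [])
    (ht : t = '<' :: tl) (htl : ∀ a ∈ tl, a ∉ pvBad)
    (h : ¬ t <+: c :: cs) : ¬ t <+: c :: pvRep old new cs := by
  intro hp
  subst ht
  rcases List.cons_prefix_cons.mp hp with ⟨h1, h2⟩
  have : tl <+: cs :=
    pvRep_prefix_back old new hnew cs tl (fun a ha hin => (htl a ha) (hgn a hin)) h2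
  exact h (List.cons_prefix_cons.mpr ⟨h1, this⟩)

theorem good_shape (p : List Char × List Char) (hg : pvGood p) : p.1 = '<' :: p.1.tail := by
  rcases hg with ⟨h1, _⟩
  cases hl : p.1 with
  | nil => rw [hl] at h1; simp at h1
  | cons a l => rw [hl] at h1; simp at h1; simp [h1]

theorem chain_cons (l : List (List Char × List Char)) (hg : ∀ p ∈ l, pvGood p) :
    ∀ (c : Char) (cs : List Char), (∀ p ∈ l, ¬ p.1 <+: c :: cs) →
      pvChain l (c :: cs) = c :: pvChain l cs := by
  induction l with
  | nil => intro c cs _; simp [pvChain]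
  | cons p l ih =>
    intro c cs h
    have hgp := hg p (by simp)
    have hstep : pvRep p.1 p.2 (c :: cs) = c :: pvRep p.1 p.2 cs :=
      pvRep_cons_neg _ _ _ _ (h p (by simp))
    have hlift : ∀ q ∈ l, ¬ q.1 <+: c :: pvRep p.1 p.2 cs := by
      intro q hq
      have hgq := hg q (by simp [hq])
      exact lift_noPrefix p.1 p.2 q.1 q.1.tail c cs hgp.2.2.2 hgp.2.2.1
        (good_shape q hgq) (fun a ha => (hgq.2.1 a ha).2) (h q (by simp [hq]))
    show pvChain l (pvRep p.1 p.2 (c :: cs)) = c :: pvChain l (pvRep p.1 p.2 cs)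
    rw [hstep, ih (fun q hq => hg q (by simp [hq])) c _ hlift]

theorem chain_skip_clean (l : List (List Char × List Char)) (hg : ∀ p ∈ l, pvGood p)
    (u : List Char) (hu : ∀ a ∈ u, a ≠ '<') :
    ∀ X, pvChain l (u ++ X) = u ++ pvChain l X := by
  induction l with
  | nil => intro X; simp [pvChain]
  | cons p l ih =>
    intro X
    have hgp := hg p (by simp)
    show pvChain l (pvRep p.1 p.2 (u ++ X)) = u ++ pvChain l (pvRep p.1 p.2 X)
    rw [pvRep_skip_clean p.1.tail p.1 p.2 u X (good_shape p hgp) hu,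
        ih (fun q hq => hg q (by simp [hq])) _]

theorem chain_skip_tag (l : List (List Char × List Char)) (hg : ∀ p ∈ l, pvGood p)
    (t tl : List Char) (ht : t = '<' :: tl) (htl : ∀ a ∈ tl, a ≠ '<')
    (hnp : ∀ p ∈ l, ¬ p.1 <+: t ∧ ¬ t <+: p.1) :
    ∀ X, pvChain l (t ++ X) = t ++ pvChain l X := by
  induction l with
  | nil => intro X; simp [pvChain]
  | cons p l ih =>
    intro X
    have hgp := hg p (by simp)
    have hhead : ¬ p.1 <+: t ++ X := by
      intro hp
      rcases List.prefix_or_prefix_of_prefix hp (List.prefix_append t X) with h | h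
      · exact (hnp p (by simp)).1 h
      · exact (hnp p (by simp)).2 h
    have hstep : pvRep p.1 p.2 (t ++ X) = t ++ pvRep p.1 p.2 X := by
      rw [ht, List.cons_append, pvRep_cons_neg _ _ _ _ (by rw [ht, List.cons_append] at hhead; exact hhead),
          pvRep_skip_clean p.1.tail p.1 p.2 tl X (good_shape p hgp) htl]
      simp
    show pvChain l (pvRep p.1 p.2 (t ++ X)) = t ++ pvChain l (pvRep p.1 p.2 X)
    rw [hstep, ih (fun q hq => hg q (by simp [hq])) (fun q hq => hnp q (by simp [hq])) _]

theorem chain_match (l1 l2 : List (List Char × List Char)) (t new : List Char)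
    (hg : ∀ p ∈ l1 ++ (t, new) :: l2, pvGood p)
    (hnp : ∀ p ∈ l1, ¬ p.1 <+: t ∧ ¬ t <+: p.1)
    (X : List Char) :
    pvChain (l1 ++ (t, new) :: l2) (t ++ X) = new ++ pvChain (l1 ++ (t, new) :: l2) X := by
  have hgt : pvGood (t, new) := hg (t, new) (by simp)
  have ht : t = '<' :: t.tail := good_shape (t, new) hgt
  have htl : ∀ a ∈ t.tail, a ≠ '<' := fun a ha => (hgt.2.1 a ha).1
  have hg1 : ∀ p ∈ l1, pvGood p := fun p hp => hg p (by simp [hp])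
  have hg2 : ∀ p ∈ l2, pvGood p := fun p hp => hg p (by simp [hp])
  have hnewlt : ∀ a ∈ new, a ≠ '<' := by
    intro a ha
    have := hgt.2.2.2 a ha
    simp [pvBad] at this
    rcases this with h | h | h | h <;> simp [h]
  have e1 : ∀ Y, pvChain (l1 ++ (t, new) :: l2) Y = pvChain l2 (pvRep t new (pvChain l1 Y)) := by
    intro Y; simp [pvChain, List.foldl_append]
  rw [e1, e1,
      chain_skip_tag l1 hg1 t t.tail ht htl hnp X,
      pvRep_match t new _ (by rw [ht]; simp),
      chain_skip_clean l2 hg2 new hnewlt]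

def pvConvs : List (List Char × List Char) :=
  [(['<','b','>'], ['*','*']), (['<','/','b','>'], ['*','*']),
   (['<','i','>'], ['_']), (['<','/','i','>'], ['_']),
   (['<','c','o','d','e','>'], ['`']), (['<','/','c','o','d','e','>'], ['`']),
   (['<','p','r','e','>'], ['`','`','`','\n']), (['<','/','p','r','e','>'], ['\n','`','`','`'])]

theorem good_convs : ∀ p ∈ pvConvs, pvGood p := by
  intro p hp
  fin_cases hp <;> exact ⟨rfl, by simp [pvBad], by simp, by simp [pvBad]⟩

theorem pvRep_nil (old new : List Char) : pvRep old new [] = [] := by rw [pvRep]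

theorem pvChain_nil : pvChain pvConvs [] = [] := by
  simp [pvChain, pvConvs, pvRep_nil]

theorem match_step (l1 l2 : List (List Char × List Char)) (t new : List Char)
    (hconv : pvConvs = l1 ++ (t, new) :: l2)
    (hnp : ∀ p ∈ l1, ¬ p.1 <+: t ∧ ¬ t <+: p.1)
    (c : Char) (cs X : List Char) (hX : t ++ X = c :: cs) :
    pvChain pvConvs (c :: cs) = new ++ pvChain pvConvs X := by
  rw [← hX, hconv]
  exact chain_match l1 l2 t new (hconv ▸ good_convs) hnp X


theorem chain_eq_scan : ∀ cs, pvChain pvConvs cs = pvScan cs := by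
  intro cs
  induction cs using pvScan.induct with
  | case1 => rw [pvScan]; exact pvChain_nil
  | case2 c cs hk ih =>
    obtain ⟨X, hX⟩ := List.isPrefixOf_iff_prefix.mp hk
    have hcs : cs = 'b'::'>'::X := by
      rw [List.cons_append] at hX; injection hX with _ h; exact h.symm
    have hXd : List.drop 2 cs = X := by rw [hcs]; simp
    rw [match_step [] _ ['<','b','>'] ['*','*'] rfl
        (by intro p hp; simp at hp) c cs X hX]
    rw [pvScan, if_pos hk, hXd, show pvChain pvConvs X = pvScan X from hXd ▸ ih]
    rfl
  | case3 c cs h1 hk ih =>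
    obtain ⟨X, hX⟩ := List.isPrefixOf_iff_prefix.mp hk
    have hcs : cs = '/'::'b'::'>'::X := by
      rw [List.cons_append] at hX; injection hX with _ h; exact h.symm
    have hXd : List.drop 3 cs = X := by rw [hcs]; simp
    rw [match_step [(['<','b','>'], ['*','*'])] _ ['<','/','b','>'] ['*','*'] rfl
        (by intro p hp; fin_cases hp; exact ⟨by decide, by decide⟩) c cs X hX]
    rw [pvScan, if_pos hk, if_neg h1, hXd, show pvChain pvConvs X = pvScan X from hXd ▸ ih]
    rfl
  | case4 c cs h1 h2 hk ih =>
    obtain ⟨X, hX⟩ := List.isPrefixOf_iff_prefix.mp hk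
    have hcs : cs = 'i'::'>'::X := by
      rw [List.cons_append] at hX; injection hX with _ h; exact h.symm
    have hXd : List.drop 2 cs = X := by rw [hcs]; simp
    rw [match_step [(['<','b','>'], ['*','*']), (['<','/','b','>'], ['*','*'])] _ ['<','i','>'] ['_'] rfl
        (by intro p hp; fin_cases hp <;> exact ⟨by decide, by decide⟩) c cs X hX]
    rw [pvScan, if_pos hk, if_neg h1, if_neg h2, hXd, show pvChain pvConvs X = pvScan X from hXd ▸ ih]
    rfl
  | case5 c cs h1 h2 h3 hk ih =>
    obtain ⟨X, hX⟩ := List.isPrefixOf_iff_prefix.mp hk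
    have hcs : cs = '/'::'i'::'>'::X := by
      rw [List.cons_append] at hX; injection hX with _ h; exact h.symm
    have hXd : List.drop 3 cs = X := by rw [hcs]; simp
    rw [match_step [(['<','b','>'], ['*','*']), (['<','/','b','>'], ['*','*']), (['<','i','>'], ['_'])] _ ['<','/','i','>'] ['_'] rfl
        (by intro p hp; fin_cases hp <;> exact ⟨by decide, by decide⟩) c cs X hX]
    rw [pvScan, if_pos hk, if_neg h1, if_neg h2, if_neg h3, hXd, show pvChain pvConvs X = pvScan X from hXd ▸ ih]
    rfl
  | case6 c cs h1 h2 h3 h4 hk ih =>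
    obtain ⟨X, hX⟩ := List.isPrefixOf_iff_prefix.mp hk
    have hcs : cs = 'c'::'o'::'d'::'e'::'>'::X := by
      rw [List.cons_append] at hX; injection hX with _ h; exact h.symm
    have hXd : List.drop 5 cs = X := by rw [hcs]; simp
    rw [match_step [(['<','b','>'], ['*','*']), (['<','/','b','>'], ['*','*']), (['<','i','>'], ['_']), (['<','/','i','>'], ['_'])] _ ['<','c','o','d','e','>'] ['`'] rfl
        (by intro p hp; fin_cases hp <;> exact ⟨by decide, by decide⟩) c cs X hX]
    rw [pvScan, if_pos hk, if_neg h1, if_neg h2, if_neg h3, if_neg h4, hXd, show pvChain pvConvs X = pvScan X from hXd ▸ ih]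
    rfl
  | case7 c cs h1 h2 h3 h4 h5 hk ih =>
    obtain ⟨X, hX⟩ := List.isPrefixOf_iff_prefix.mp hk
    have hcs : cs = '/'::'c'::'o'::'d'::'e'::'>'::X := by
      rw [List.cons_append] at hX; injection hX with _ h; exact h.symm
    have hXd : List.drop 6 cs = X := by rw [hcs]; simp
    rw [match_step [(['<','b','>'], ['*','*']), (['<','/','b','>'], ['*','*']), (['<','i','>'], ['_']), (['<','/','i','>'], ['_']), (['<','c','o','d','e','>'], ['`'])] _ ['<','/','c','o','d','e','>'] ['`'] rfl
        (by intro p hp; fin_cases hp <;> exact ⟨by decide, by decide⟩) c cs X hX]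
    rw [pvScan, if_pos hk, if_neg h1, if_neg h2, if_neg h3, if_neg h4, if_neg h5, hXd, show pvChain pvConvs X = pvScan X from hXd ▸ ih]
    rfl
  | case8 c cs h1 h2 h3 h4 h5 h6 hk ih =>
    obtain ⟨X, hX⟩ := List.isPrefixOf_iff_prefix.mp hk
    have hcs : cs = 'p'::'r'::'e'::'>'::X := by
      rw [List.cons_append] at hX; injection hX with _ h; exact h.symm
    have hXd : List.drop 4 cs = X := by rw [hcs]; simp
    rw [match_step [(['<','b','>'], ['*','*']), (['<','/','b','>'], ['*','*']), (['<','i','>'], ['_']), (['<','/','i','>'], ['_']), (['<','c','o','d','e','>'], ['`']), (['<','/','c','o','d','e','>'], ['`'])] _ ['<','p','r','e','>'] ['`','`','`','\n'] rfl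
        (by intro p hp; fin_cases hp <;> exact ⟨by decide, by decide⟩) c cs X hX]
    rw [pvScan, if_pos hk, if_neg h1, if_neg h2, if_neg h3, if_neg h4, if_neg h5, if_neg h6, hXd, show pvChain pvConvs X = pvScan X from hXd ▸ ih]
    rfl
  | case9 c cs h1 h2 h3 h4 h5 h6 h7 hk ih =>
    obtain ⟨X, hX⟩ := List.isPrefixOf_iff_prefix.mp hk
    have hcs : cs = '/'::'p'::'r'::'e'::'>'::X := by
      rw [List.cons_append] at hX; injection hX with _ h; exact h.symm
    have hXd : List.drop 5 cs = X := by rw [hcs]; simp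
    rw [match_step [(['<','b','>'], ['*','*']), (['<','/','b','>'], ['*','*']), (['<','i','>'], ['_']), (['<','/','i','>'], ['_']), (['<','c','o','d','e','>'], ['`']), (['<','/','c','o','d','e','>'], ['`']), (['<','p','r','e','>'], ['`','`','`','\n'])] _ ['<','/','p','r','e','>'] ['\n','`','`','`'] rfl
        (by intro p hp; fin_cases hp <;> exact ⟨by decide, by decide⟩) c cs X hX]
    rw [pvScan, if_pos hk, if_neg h1, if_neg h2, if_neg h3, if_neg h4, if_neg h5, if_neg h6, if_neg h7, hXd, show pvChain pvConvs X = pvScan X from hXd ▸ ih]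
    rfl
  | case10 c cs h1 h2 h3 h4 h5 h6 h7 h8 ih =>
    have hall : ∀ p ∈ pvConvs, ¬ p.1 <+: c :: cs := by
      intro p hp
      fin_cases hp
      exacts [fun h => h1 (List.isPrefixOf_iff_prefix.mpr h),
        fun h => h2 (List.isPrefixOf_iff_prefix.mpr h),
        fun h => h3 (List.isPrefixOf_iff_prefix.mpr h),
        fun h => h4 (List.isPrefixOf_iff_prefix.mpr h),
        fun h => h5 (List.isPrefixOf_iff_prefix.mpr h),
        fun h => h6 (List.isPrefixOf_iff_prefix.mpr h),
        fun h => h7 (List.isPrefixOf_iff_prefix.mpr h),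
        fun h => h8 (List.isPrefixOf_iff_prefix.mpr h)]
    rw [chain_cons pvConvs good_convs c cs hall, ih,
        pvScan, if_neg h1, if_neg h2, if_neg h3, if_neg h4, if_neg h5, if_neg h6, if_neg h7, if_neg h8]

theorem str_replace_ofList (l : List Char) (o n : String) (ho : o.toList ≠ []) :
    PySem.Str.replace (String.ofList l) o n = String.ofList (pvRep o.toList n.toList l) := by
  rw [PySem.Str.replace, String.toList_ofList, replace_eq_pvRep _ _ _ ho]

theorem A_eq_chain (html : String) :
    html_to_discord_markdown_py html = String.ofList (pvChain pvConvs html.toList) := by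
  simp only [html_to_discord_markdown_py, List.foldl]
  rw [show html = String.ofList html.toList from String.ofList_toList.symm]
  rw [str_replace_ofList _ _ _ (by decide), str_replace_ofList _ _ _ (by decide),
      str_replace_ofList _ _ _ (by decide), str_replace_ofList _ _ _ (by decide),
      str_replace_ofList _ _ _ (by decide), str_replace_ofList _ _ _ (by decide),
      str_replace_ofList _ _ _ (by decide), str_replace_ofList _ _ _ (by decide)]
  simp [pvChain, pvConvs, List.foldl]

-- ===== VERDICT (by name: the statement is the Claim_ definition above) =====
theorem html_to_discord_markdown_py_spec : Claim_equal_html_to_discord_markdown_py := by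
  intro html _
  show html_to_discord_markdown_py html = html_to_discord_markdown_py_alt html
  rw [A_eq_chain, chain_eq_scan]
  rfl
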